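-- pv_equiv track=rewrite | github.com/RuBisCO28/coding | leetcode/17.py | combination_f
-- ===== SOURCE A (Python) =====
-- def combination_f(a, b, c, d):
--   answer = []
--   for i in range(len(a)):
--     for j in range(len(b)):
--       for k in range(len(c)):
--         for l in range(len(d)):
--           answer.append(a[i]+b[j]+c[k]+d[l])
--   return answer
-- ===== SOURCE B (Python) =====
-- def combination_f(a, b, c, d):
--     acc = list(a)
--     for lst in (b, c, d):
--         acc = [x + y for x in acc for y in lst]
--     return acc
-- ===== Notes on version B (the rewrite author's own statement) =====
-- stated objective: simpler
-- what changed: Replaces the four fixed nested index loops with an iterative fold: the accumulator starts as list(a) and is cross-concatenated with each remaining list in turn, preserving the (i,j,k,l) output order.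
import Mathlib
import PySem

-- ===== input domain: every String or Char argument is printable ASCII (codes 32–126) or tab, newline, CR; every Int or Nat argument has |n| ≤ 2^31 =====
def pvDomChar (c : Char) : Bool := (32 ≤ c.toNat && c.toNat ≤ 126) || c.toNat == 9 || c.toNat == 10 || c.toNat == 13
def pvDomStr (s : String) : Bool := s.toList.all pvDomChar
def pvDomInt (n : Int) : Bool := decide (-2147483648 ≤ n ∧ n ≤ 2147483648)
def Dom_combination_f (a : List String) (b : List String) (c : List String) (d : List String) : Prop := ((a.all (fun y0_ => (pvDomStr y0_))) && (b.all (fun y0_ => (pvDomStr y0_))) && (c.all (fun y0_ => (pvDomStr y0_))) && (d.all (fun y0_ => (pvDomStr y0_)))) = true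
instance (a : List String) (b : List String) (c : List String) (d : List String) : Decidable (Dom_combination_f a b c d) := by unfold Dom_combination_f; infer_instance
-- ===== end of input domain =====

-- B builds the four-way concatenations by folding a running cross-product over the last three lists
-- instead of A's four fixed nested index loops (objective: simpler; same output, same order, same cost).

-- ===== PORT A =====
-- four nested 'for _ in range(len(_))' loops appending a[i]+b[j]+c[k]+d[l]
def combination_f (a : List String) (b : List String) (c : List String) (d : List String) : List String :=
  (PySem.List.pyRange 0 a.length 1).foldl (fun answer i =>
    (PySem.List.pyRange 0 b.length 1).foldl (fun answer j =>
      (PySem.List.pyRange 0 c.length 1).foldl (fun answer k =>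
        (PySem.List.pyRange 0 d.length 1).foldl (fun answer l =>
          answer ++ [PySem.List.pyGetD a i "" ++ PySem.List.pyGetD b j "" ++
                     PySem.List.pyGetD c k "" ++ PySem.List.pyGetD d l ""]) answer) answer) answer) []

-- ===== PORT B =====
-- acc = list(a); for lst in (b, c, d): acc = [x + y for x in acc for y in lst]
def combination_f_alt (a : List String) (b : List String) (c : List String) (d : List String) : List String :=
  [b, c, d].foldl (fun acc lst => acc.flatMap (fun x => lst.map (fun y => x ++ y))) a

-- ===== PRECONDITION & SPEC =====
def Spec_combination_f (a : List String) (b : List String) (c : List String) (d : List String) (out : List String) : Prop := out = combination_f_alt a b c d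
instance (a : List String) (b : List String) (c : List String) (d : List String) (out : List String) : Decidable (Spec_combination_f a b c d out) := by unfold Spec_combination_f; infer_instance

-- ===== CLAIM (what is proved, stated in full; the proofs are below) =====
def Claim_equal_combination_f : Prop := ∀ (a : List String) (b : List String) (c : List String) (d : List String), Dom_combination_f a b c d → Spec_combination_f a b c d (combination_f a b c d)

-- ===== LEMMAS AND PROOFS =====

-- A flatMap over 'range(len(xs))' indexing xs is a flatMap over xs itself.
theorem flatMap_pyRange_pyGetD {β : Type} (xs : List String) (dflt : String) (F : String → List β) :
    (PySem.List.pyRange 0 (xs.length : Int) 1).flatMap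
        (fun i => F (PySem.List.pyGetD xs i dflt)) = xs.flatMap F := by
  rw [← List.flatMap_map (fun i => PySem.List.pyGetD xs i dflt) F,
    PySem.List.map_pyGetD_pyRange_zero' xs dflt]

-- A's nested loops produce the nested-flatMap closed form.
theorem combination_f_eq_flatMap (a b c d : List String) :
    combination_f a b c d =
      a.flatMap (fun x => b.flatMap (fun y => c.flatMap (fun z =>
        d.map (fun w => x ++ y ++ z ++ w)))) := by
  unfold combination_f
  simp only [PySem.List.foldl_append_singleton_eq_map, PySem.List.foldl_append_eq_flatMap]
  simp only [List.nil_append]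
  rw [flatMap_pyRange_pyGetD a "" (fun x =>
    (PySem.List.pyRange 0 (b.length : Int) 1).flatMap (fun j =>
      (PySem.List.pyRange 0 (c.length : Int) 1).flatMap (fun k =>
        (PySem.List.pyRange 0 (d.length : Int) 1).map (fun l =>
          x ++ PySem.List.pyGetD b j "" ++ PySem.List.pyGetD c k "" ++ PySem.List.pyGetD d l ""))))]
  refine List.flatMap_congr (fun x _ => ?_)
  rw [flatMap_pyRange_pyGetD b "" (fun y =>
    (PySem.List.pyRange 0 (c.length : Int) 1).flatMap (fun k =>
      (PySem.List.pyRange 0 (d.length : Int) 1).map (fun l =>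
        x ++ y ++ PySem.List.pyGetD c k "" ++ PySem.List.pyGetD d l "")))]
  refine List.flatMap_congr (fun y _ => ?_)
  rw [flatMap_pyRange_pyGetD c "" (fun z =>
    (PySem.List.pyRange 0 (d.length : Int) 1).map (fun l =>
      x ++ y ++ z ++ PySem.List.pyGetD d l ""))]
  refine List.flatMap_congr (fun z _ => ?_)
  conv_rhs => rw [← PySem.List.map_pyGetD_pyRange_zero' d ""]
  simp [List.map_map, Function.comp]

-- B's fold produces the same closed form (left-nested appends flatten identically).
theorem combination_f_alt_eq_flatMap (a b c d : List String) :
    combination_f_alt a b c d =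
      a.flatMap (fun x => b.flatMap (fun y => c.flatMap (fun z =>
        d.map (fun w => x ++ y ++ z ++ w)))) := by
  unfold combination_f_alt
  simp [List.foldl, List.flatMap_map, List.flatMap_assoc]

-- ===== VERDICT (by name: the statement is the Claim_ definition above) =====
theorem combination_f_spec : Claim_equal_combination_f := by
  intro a b c d _
  unfold Spec_combination_f
  rw [combination_f_eq_flatMap, combination_f_alt_eq_flatMap]
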